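-- pv_equiv track=rewrite | github.com/Bondifuzz/crash-analyzer | crash_analyzer/app/agents/libfuzzer.py | _read_go_fuzz_stacktrace
-- ===== SOURCE A (Python) =====
-- def _read_go_fuzz_stacktrace(output: str):
--     res = []
--     for line in output.splitlines(True):
--         if line.startswith("panic: "):
--             res = [line]
--         else:
--             res.append(line)
--
--     for i in range(len(res)):
--         if '=========' in res[i] or '== ERROR: ' in res[i]:
--             res = res[0:i]
--             break
--
--     return "\n".join(res)
-- ===== SOURCE B (Python) =====
-- def _read_go_fuzz_stacktrace(output: str):
--     # Single forward pass: a small state machine with an accumulator and a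
--     # boolean drop flag.  A panic line restarts the trace (and clears the flag);
--     # once a terminator line is seen, following lines are dropped until the
--     # next panic line.  No second truncation loop, no slicing.
--     res = []
--     cut = False
--     for line in output.splitlines(True):
--         terminal = '=========' in line or '== ERROR: ' in line
--         if line.startswith("panic: "):
--             res = [] if terminal else [line]
--             cut = terminal
--         elif not cut:
--             if terminal:
--                 cut = True
--             else:
--                 res.append(line)
--     return "\n".join(res)
-- ===== Notes on version B (the rewrite author's own statement) =====
-- stated objective: alternative
-- what changed: A's two staged passes (rebuild the list resetting on panic lines, then a second index loop that truncates at the first terminator) are fused into one single-pass state machine carrying an accumulator plus a boolean drop flag, so no second loop and no list slicing happen at all.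
import Mathlib
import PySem

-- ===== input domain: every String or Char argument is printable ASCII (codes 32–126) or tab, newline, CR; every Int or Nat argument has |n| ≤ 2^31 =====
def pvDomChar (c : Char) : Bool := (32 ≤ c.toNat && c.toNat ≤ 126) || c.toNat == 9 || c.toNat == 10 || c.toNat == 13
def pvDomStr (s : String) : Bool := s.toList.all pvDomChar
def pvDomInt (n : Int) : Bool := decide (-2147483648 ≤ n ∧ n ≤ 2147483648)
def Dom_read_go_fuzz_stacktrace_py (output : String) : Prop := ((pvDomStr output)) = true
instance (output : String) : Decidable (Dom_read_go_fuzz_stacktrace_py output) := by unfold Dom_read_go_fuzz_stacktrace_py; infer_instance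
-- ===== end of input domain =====

-- B fuses A's two staged passes into one single-pass state machine (accumulator + cut flag); objective: alternative decomposition, same cost.

-- output.splitlines(True) (keepends): hand port, exact on the Dom alphabet, whose only
-- line terminators are '\n', '\r' and '\r\n' (other Unicode terminators are outside Dom).
def pvSplitKeepAux (cur : List Char) : List Char → List (List Char)
  | [] => if cur.isEmpty then [] else [cur]
  | c :: rest =>
    if c = '\n' then (cur ++ ['\n']) :: pvSplitKeepAux [] rest
    else if c = '\r' then
      match rest with
      | '\n' :: rest' => (cur ++ ['\r', '\n']) :: pvSplitKeepAux [] rest'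
      | rest2 => (cur ++ ['\r']) :: pvSplitKeepAux [] rest2
    else pvSplitKeepAux (cur ++ [c]) rest
termination_by cs => cs.length

def pvSplitKeep (cs : List Char) : List (List Char) := pvSplitKeepAux [] cs

def pvIsPanic (l : List Char) : Bool := PySem.Chars.startswith l "panic: ".toList

def pvIsTerm (l : List Char) : Bool :=
  PySem.Chars.isIn "=========".toList l || PySem.Chars.isIn "== ERROR: ".toList l

-- ===== PORT A =====
-- first loop: res resets to [line] on a panic line, else appends; second loop:
-- scan res in order and drop everything from the first terminator line on (break).
def pvCutA : List (List Char) → List (List Char)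
  | [] => []
  | l :: rest => if pvIsTerm l then [] else l :: pvCutA rest

def read_go_fuzz_stacktrace_py (output : String) : String :=
  let res := (pvSplitKeep output.toList).foldl
    (fun res line => if pvIsPanic line then [line] else res ++ [line]) []
  String.ofList (PySem.Chars.join ['\n'] (pvCutA res))

-- ===== PORT B =====
-- one pass; state = (accumulated trace lines, cut flag)
def pvStepB (st : List (List Char) × Bool) (line : List Char) : List (List Char) × Bool :=
  let terminal := pvIsTerm line
  if pvIsPanic line then
    (if terminal then [] else [line], terminal)
  else if !st.2 then
    if terminal then (st.1, true) else (st.1 ++ [line], st.2)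
  else st

def read_go_fuzz_stacktrace_py_alt (output : String) : String :=
  let st := (pvSplitKeep output.toList).foldl pvStepB ([], false)
  String.ofList (PySem.Chars.join ['\n'] st.1)

-- ===== PRECONDITION & SPEC =====
def Spec_read_go_fuzz_stacktrace_py (output : String) (out : String) : Prop := out = read_go_fuzz_stacktrace_py_alt output
instance (output : String) (out : String) : Decidable (Spec_read_go_fuzz_stacktrace_py output out) := by unfold Spec_read_go_fuzz_stacktrace_py; infer_instance

-- ===== CLAIM (what is proved, stated in full; the proofs are below) =====
def Claim_equal_read_go_fuzz_stacktrace_py : Prop := ∀ (output : String), Dom_read_go_fuzz_stacktrace_py output → Spec_read_go_fuzz_stacktrace_py output (read_go_fuzz_stacktrace_py output)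

-- ===== LEMMAS AND PROOFS =====

theorem pvCutA_append_one (xs : List (List Char)) (l : List Char) :
    pvCutA (xs ++ [l]) =
      if xs.any pvIsTerm then pvCutA xs
      else if pvIsTerm l then pvCutA xs else pvCutA xs ++ [l] := by
  induction xs with
  | nil => by_cases h : pvIsTerm l <;> simp [pvCutA, h]
  | cons x rest ih =>
    by_cases hx : pvIsTerm x
    · simp [pvCutA, hx]
    · have hcons : (x :: rest).any pvIsTerm = rest.any pvIsTerm := by simp [hx]
      simp only [List.cons_append, pvCutA, hx, Bool.false_eq_true, if_false, hcons, ih]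
      split_ifs <;> simp

-- invariant: B's fold state over any prefix is (truncated A-result, A-result has a terminator)
theorem pvFoldB_inv (lines : List (List Char)) : ∀ res : List (List Char),
    lines.foldl pvStepB (pvCutA res, res.any pvIsTerm) =
      (pvCutA (lines.foldl (fun res line => if pvIsPanic line then [line] else res ++ [line]) res),
       (lines.foldl (fun res line => if pvIsPanic line then [line] else res ++ [line]) res).any pvIsTerm) := by
  induction lines with
  | nil => intro res; simp
  | cons l rest ih =>
    intro res
    simp only [List.foldl_cons]
    by_cases hp : pvIsPanic l
    · have : pvStepB (pvCutA res, res.any pvIsTerm) l =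
          (pvCutA [l], ([l]).any pvIsTerm) := by
        by_cases ht : pvIsTerm l <;> simp [pvStepB, hp, ht, pvCutA]
      rw [this, ih, hp]; simp
    · have : pvStepB (pvCutA res, res.any pvIsTerm) l =
          (pvCutA (res ++ [l]), (res ++ [l]).any pvIsTerm) := by
        by_cases hr : res.any pvIsTerm
        · have : pvCutA (res ++ [l]) = pvCutA res := by
            rw [pvCutA_append_one]; simp [hr]
          simp [pvStepB, hp, hr, this]
        · by_cases ht : pvIsTerm l <;>
            simp [pvStepB, hp, hr, ht, pvCutA_append_one]
      rw [this, ih, if_neg (by simp [hp])]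

-- ===== VERDICT (by name: the statement is the Claim_ definition above) =====
theorem read_go_fuzz_stacktrace_py_spec : Claim_equal_read_go_fuzz_stacktrace_py := by
  intro output _
  unfold Spec_read_go_fuzz_stacktrace_py
  unfold read_go_fuzz_stacktrace_py read_go_fuzz_stacktrace_py_alt
  dsimp only
  have h := pvFoldB_inv (pvSplitKeep output.toList) []
  simp only [pvCutA, List.any_nil] at h
  rw [h]
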